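-- pv_equiv track=rewrite | github.com/Noureldeinnagi/SafeDose | make_unlabeled_traffic_stream (1).py | infer_class_name
-- ===== SOURCE A (Python) =====
-- def infer_class_name(filename: str) -> str:
--     name = filename
--     for suffix in ["_test.pcap.csv", "_test.csv", ".pcap.csv", ".csv"]:
--         if name.lower().endswith(suffix):
--             name = name[: -len(suffix)]
--             break
--     # remove "_test" if still present
--     if name.lower().endswith("_test"):
--         name = name[:-5]
--     return name
-- ===== SOURCE B (Python) =====
-- def infer_class_name(filename: str) -> str:
--     # Decomposed strip chain instead of a suffix-list loop: peel ".csv",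
--     # then (only then) ".pcap" and "_test", then a final "_test".
--     def chop(s, suf):
--         return s[: -len(suf)] if s.lower().endswith(suf) else s
--
--     if filename.lower().endswith(".csv"):
--         name = chop(chop(filename[:-4], ".pcap"), "_test")
--     else:
--         name = filename
--     return chop(name, "_test")
-- ===== Notes on version B (the rewrite author's own statement) =====
-- stated objective: simpler
-- what changed: Replaces A's break-on-first loop over four precomposed suffixes by a chain of single-piece conditional strips: peel ".csv", and only then ".pcap" and "_test", then the final "_test".
import Mathlib
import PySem

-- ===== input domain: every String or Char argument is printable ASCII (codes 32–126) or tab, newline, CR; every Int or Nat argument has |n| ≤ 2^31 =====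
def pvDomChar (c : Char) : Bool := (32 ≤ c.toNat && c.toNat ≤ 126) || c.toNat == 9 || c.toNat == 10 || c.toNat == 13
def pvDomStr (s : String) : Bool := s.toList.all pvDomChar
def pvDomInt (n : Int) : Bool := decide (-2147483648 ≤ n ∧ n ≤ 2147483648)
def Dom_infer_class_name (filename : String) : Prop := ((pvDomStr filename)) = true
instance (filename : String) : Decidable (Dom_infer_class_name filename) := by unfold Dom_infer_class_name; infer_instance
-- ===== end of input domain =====

-- B replaces A's break-on-first loop over four composite suffixes by a chain of
-- single-piece conditional strips (".csv", then ".pcap", then "_test", then a final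
-- "_test"); objective: simpler decomposition, same cost.

-- ===== PORT A =====
-- the for-loop over the suffix list with break
def pvLoopA (name : List Char) : List (List Char) → List Char
  | [] => name
  | suf :: rest =>
    if PySem.Chars.endswith (PySem.Chars.lower name) suf then
      PySem.List.slice name none (some (-(suf.length : Int)))   -- name[:-len(suffix)]
    else pvLoopA name rest

def pvMainA (cs : List Char) : List Char :=
  let name := pvLoopA cs
      ["_test.pcap.csv".toList, "_test.csv".toList, ".pcap.csv".toList, ".csv".toList]
  if PySem.Chars.endswith (PySem.Chars.lower name) "_test".toList then
    PySem.List.slice name none (some (-(5 : Nat) : Int))        -- name[:-5]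
  else name

def infer_class_name (filename : String) : String :=
  String.ofList (pvMainA filename.toList)

-- ===== PORT B =====
-- chop(s, suf) = s[:-len(suf)] if s.lower().endswith(suf) else s
def pvChop (s suf : List Char) : List Char :=
  if PySem.Chars.endswith (PySem.Chars.lower s) suf then
    PySem.List.slice s none (some (-(suf.length : Int)))
  else s

def pvMainB (cs : List Char) : List Char :=
  let name :=
    if PySem.Chars.endswith (PySem.Chars.lower cs) ".csv".toList then
      pvChop (pvChop (PySem.List.slice cs none (some (-(4 : Nat) : Int))) ".pcap".toList) "_test".toList
    else cs
  pvChop name "_test".toList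

def infer_class_name_alt (filename : String) : String :=
  String.ofList (pvMainB filename.toList)

-- ===== PRECONDITION & SPEC =====
def Spec_infer_class_name (filename : String) (out : String) : Prop := out = infer_class_name_alt filename
instance (filename : String) (out : String) : Decidable (Spec_infer_class_name filename out) := by unfold Spec_infer_class_name; infer_instance

-- ===== CLAIM (what is proved, stated in full; the proofs are below) =====
def Claim_equal_infer_class_name : Prop := ∀ (filename : String), Dom_infer_class_name filename → Spec_infer_class_name filename (infer_class_name filename)

-- ===== LEMMAS AND PROOFS =====

-- splitting a composite suffix test: if b is a suffix, (a ++ b) is a suffix iff a is a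
-- suffix of what remains after chopping b off
theorem pv_suffix_append_iff (a b M : List Char) (hb : b <:+ M) :
    ((a ++ b) <:+ M ↔ a <:+ M.take (M.length - b.length)) := by
  obtain ⟨u, rfl⟩ := hb
  rw [show (u ++ b).length - b.length = u.length by simp, List.take_left]
  constructor
  · rintro ⟨t, h⟩
    rw [← List.append_assoc] at h
    exact ⟨t, List.append_cancel_right h⟩
  · rintro ⟨t, rfl⟩; exact ⟨t, by simp⟩

theorem pv_not_suffix_append (a b M : List Char) (hb : ¬ b <:+ M) : ¬ (a ++ b) <:+ M :=
  fun h2 => hb ((List.suffix_append a b).trans h2)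

theorem pv_lower_take (cs : List Char) (m : Nat) :
    PySem.Chars.lower (List.take m cs) = (PySem.Chars.lower cs).take m := by
  simp [PySem.Chars.lower, List.map_take]

theorem pv_lower_length (cs : List Char) : (PySem.Chars.lower cs).length = cs.length := by
  simp [PySem.Chars.lower]

theorem pv_endswith_decide (x t : List Char) : PySem.Chars.endswith x t = decide (t <:+ x) := by
  by_cases h : t <:+ x
  · simp [h, (PySem.Chars.endswith_iff x t).mpr h]
  · rw [decide_eq_false h]
    exact Bool.eq_false_iff.mpr (fun hc => h ((PySem.Chars.endswith_iff x t).mp hc))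

theorem pv_suffix_eq_of_length (a b l : List Char) (ha : a <:+ l) (hb : b <:+ l)
    (h : a.length = b.length) : a = b := by
  obtain ⟨u, rfl⟩ := ha
  obtain ⟨v, hv⟩ := hb
  have hu : v.length = u.length := by
    have := congrArg List.length hv; simp at this; omega
  exact (List.append_inj_right hv hu).symm

theorem pvMain_eq (cs : List Char) : pvMainA cs = pvMainB cs := by
  have sl : ∀ (xs : List Char) (k : Nat), 0 < k →
      PySem.List.slice xs none (some (-(k : Int))) = xs.take (xs.length - k) :=
    fun xs k hk => PySem.List.slice_to_neg_natCast xs k hk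
  have sl14 := fun xs => sl xs 14 (by norm_num)
  have sl9 := fun xs => sl xs 9 (by norm_num)
  have sl5 := fun xs => sl xs 5 (by norm_num)
  have sl4 := fun xs => sl xs 4 (by norm_num)
  have l14 : ("_test.pcap.csv".toList).length = 14 := rfl
  have l9 : ("_test.csv".toList).length = 9 := rfl
  have l8 : (".pcap.csv".toList).length = 9 := rfl
  have l5 : ("_test".toList).length = 5 := rfl
  have l45 : (".pcap".toList).length = 5 := rfl
  have l4 : (".csv".toList).length = 4 := rfl
  have d14 : "_test.pcap.csv".toList = ("_test".toList ++ ".pcap".toList) ++ ".csv".toList := rfl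
  have d9 : "_test.csv".toList = "_test".toList ++ ".csv".toList := rfl
  have d8 : ".pcap.csv".toList = ".pcap".toList ++ ".csv".toList := rfl
  have hM : (PySem.Chars.lower cs).length = cs.length := pv_lower_length cs
  have f1 : min (cs.length - 4) cs.length = cs.length - 4 := by omega
  have f2 : min (cs.length - 9) cs.length = cs.length - 9 := by omega
  have f3 : min (cs.length - 14) cs.length = cs.length - 14 := by omega
  have g1 : min (cs.length - 4 - 5) (cs.length - 4) = cs.length - 9 := by omega
  have g2 : min (cs.length - 9 - 5) (cs.length - 9) = cs.length - 14 := by omega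
  have g3 : min (cs.length - 14 - 5) (cs.length - 14) = cs.length - 19 := by omega
  simp only [pvMainA, pvMainB, pvLoopA, pvChop, pv_endswith_decide, l14, l9, l8, l5, l45, l4,
    sl14, sl9, sl5, sl4, pv_lower_take, decide_eq_true_eq, List.length_take]
  by_cases h4 : ".csv".toList <:+ PySem.Chars.lower cs
  · have i1 := pv_suffix_append_iff ("_test".toList ++ ".pcap".toList) ".csv".toList _ h4
    rw [l4, hM] at i1
    have i1' := pv_suffix_append_iff ".pcap".toList ".csv".toList _ h4
    rw [l4, hM] at i1'
    have i9 := pv_suffix_append_iff "_test".toList ".csv".toList _ h4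
    rw [l4, hM] at i9
    by_cases h8 : ".pcap".toList <:+ List.take (cs.length - 4) (PySem.Chars.lower cs)
    · have i2 := pv_suffix_append_iff "_test".toList ".pcap".toList _ h8
      simp only [List.length_take, hM, l45, f1, List.take_take, g1] at i2
      have c14 : ("_test.pcap.csv".toList <:+ PySem.Chars.lower cs) ↔
          ("_test".toList <:+ List.take (cs.length - 9) (PySem.Chars.lower cs)) := by
        rw [d14, i1, i2]
      have c8 : ".pcap.csv".toList <:+ PySem.Chars.lower cs := by rw [d8, i1']; exact h8
      have c9 : ¬ ("_test.csv".toList <:+ PySem.Chars.lower cs) := by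
        rw [d9, i9]
        intro h9'
        exact absurd (pv_suffix_eq_of_length _ _ _ h9' h8 (by rw [l5, l45])) (by decide)
      by_cases h14 : "_test".toList <:+ List.take (cs.length - 9) (PySem.Chars.lower cs)
      · simp only [h4, h8, c14, h14, c9, c8, if_true, if_false,
          List.length_take, List.take_take, pv_lower_take, f1, f2, f3, g1, g2, g3]
      · simp only [h4, h8, c14, h14, c9, c8, if_true, if_false,
          List.length_take, List.take_take, pv_lower_take, f1, f2, g1]
    · have c14 : ¬ ("_test.pcap.csv".toList <:+ PySem.Chars.lower cs) := by
        rw [d14, i1]; exact pv_not_suffix_append _ _ _ h8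
      have c8 : ¬ (".pcap.csv".toList <:+ PySem.Chars.lower cs) := by
        rw [d8, i1']; exact h8
      have c9 : ("_test.csv".toList <:+ PySem.Chars.lower cs) ↔
          ("_test".toList <:+ List.take (cs.length - 4) (PySem.Chars.lower cs)) := by
        rw [d9, i9]
      by_cases h9 : "_test".toList <:+ List.take (cs.length - 4) (PySem.Chars.lower cs)
      · simp only [h4, h8, c14, c8, c9, h9, if_true, if_false,
          List.length_take, List.take_take, pv_lower_take, f1, f2, g1, g2]
      · simp only [h4, h8, c14, c8, c9, h9, if_true, if_false,
          List.length_take, pv_lower_take, f1]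
  · have c14 : ¬ ("_test.pcap.csv".toList <:+ PySem.Chars.lower cs) := by
      rw [d14]; exact pv_not_suffix_append _ _ _ h4
    have c9 : ¬ ("_test.csv".toList <:+ PySem.Chars.lower cs) := by
      rw [d9]; exact pv_not_suffix_append _ _ _ h4
    have c8 : ¬ (".pcap.csv".toList <:+ PySem.Chars.lower cs) := by
      rw [d8]; exact pv_not_suffix_append _ _ _ h4
    simp only [h4, c14, c9, c8, if_false]

theorem pvStr_eq (filename : String) : infer_class_name filename = infer_class_name_alt filename := by
  unfold infer_class_name infer_class_name_alt
  rw [pvMain_eq]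

-- ===== VERDICT (by name: the statement is the Claim_ definition above) =====
theorem infer_class_name_spec : Claim_equal_infer_class_name := by
  intro filename _
  unfold Spec_infer_class_name
  exact pvStr_eq filename
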